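-- pv_equiv track=rewrite | github.com/alifbhadrika/cryparithmetic-solver | src/belajar.py | combs
-- ===== SOURCE A (Python) =====
-- def combs(s, r):
--     if not r:
--         yield ''
--     elif s:
--         first, rest = s[0], s[1:]
--         for comb in combs(rest, r-1):
--             yield first + comb  # use first char ...
--         yield from combs(rest, r)  # ... or don't
-- ===== SOURCE B (Python) =====
-- def combs(s, r):
--     # Explicit-stack depth-first traversal instead of recursion.
--     stack = [("", s, r)]
--     while stack:
--         prefix, rest, k = stack.pop()
--         if not k:
--             yield prefix
--         elif rest:
--             # push the "skip first char" frame first so the "take it" frame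
--             # is popped (and thus emitted) first
--             stack.append((prefix, rest[1:], k))
--             stack.append((prefix + rest[0], rest[1:], k - 1))
-- ===== Notes on version B (the rewrite author's own statement) =====
-- stated objective: alternative
-- what changed: B replaces A's include/exclude recursion by an iterative depth-first traversal over an explicit stack of (prefix, remaining string, needed count) frames, popping frames in a flat while loop.
import Mathlib
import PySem

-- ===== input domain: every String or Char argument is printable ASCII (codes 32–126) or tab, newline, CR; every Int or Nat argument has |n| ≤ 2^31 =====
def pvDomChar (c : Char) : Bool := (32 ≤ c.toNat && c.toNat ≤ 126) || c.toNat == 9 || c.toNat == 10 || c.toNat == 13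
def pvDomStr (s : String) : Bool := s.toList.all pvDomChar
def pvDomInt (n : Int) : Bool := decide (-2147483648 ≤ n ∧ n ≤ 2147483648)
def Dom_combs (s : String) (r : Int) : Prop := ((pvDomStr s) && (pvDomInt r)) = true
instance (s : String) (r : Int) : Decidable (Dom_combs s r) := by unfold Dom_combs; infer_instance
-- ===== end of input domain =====

-- B replaces A's include/exclude recursion by an explicit-stack iterative DFS (alternative decomposition, same cost); equivalence of the yielded lists is proved.


-- ===== PORT A =====
-- A: include/exclude recursion on the head character, transcribed over the char list
def combsA (l : List Char) (r : Int) : List (List Char) :=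
  if r = 0 then [[]]
  else
    match l with
    | [] => []
    | first :: rest =>
      ((combsA rest (r - 1)).map (fun comb => first :: comb)) ++ combsA rest r
termination_by l.length

def combs (s : String) (r : Int) : List String :=
  (combsA s.toList r).map (fun l => String.mk l)

-- ===== PORT B =====
-- B: the while loop pops (prefix, rest, k) frames from an explicit stack;
-- strings are ported as char lists, the LIFO stack as a list with head = top
def combsBLoop (stack : List (List Char × List Char × Int)) : List (List Char) :=
  match stack with
  | [] => []
  | (pre, rest, k) :: st =>
    if k = 0 then pre :: combsBLoop st
    else
      match rest with
      | [] => combsBLoop st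
      | c :: rest' =>
        combsBLoop ((pre ++ [c], rest', k - 1) :: (pre, rest', k) :: st)
termination_by (stack.map (fun f => 3 ^ f.2.1.length)).sum
decreasing_by
  · have h1 : 0 < 3 ^ rest.length := Nat.pow_pos (by omega)
    simp only [List.map_cons, List.sum_cons]
    omega
  · simp only [List.map_cons, List.sum_cons, List.length_nil, pow_zero]
    omega
  · have h1 : 0 < 3 ^ rest'.length := Nat.pow_pos (by omega)
    simp only [List.map_cons, List.sum_cons, List.length_cons, pow_succ]
    omega

def combs_alt (s : String) (r : Int) : List String :=
  (combsBLoop [([], s.toList, r)]).map (fun l => String.mk l)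

-- ===== PRECONDITION & SPEC =====
def Spec_combs (s : String) (r : Int) (out : List String) : Prop := out = combs_alt s r
instance (s : String) (r : Int) (out : List String) : Decidable (Spec_combs s r out) := by unfold Spec_combs; infer_instance

-- ===== CLAIM (what is proved, stated in full; the proofs are below) =====
def Claim_equal_combs : Prop := ∀ (s : String) (r : Int), Dom_combs s r → Spec_combs s r (combs s r)

-- ===== LEMMAS AND PROOFS =====
-- processing a frame on top of the stack yields A's combinations (prefixed) and then the rest
theorem combsBLoop_cons (l : List Char) (r : Int) (pre : List Char)
    (st : List (List Char × List Char × Int)) :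
    combsBLoop ((pre, l, r) :: st) = (combsA l r).map (fun c => pre ++ c) ++ combsBLoop st := by
  induction l generalizing r pre st with
  | nil =>
    conv_lhs => rw [combsBLoop.eq_def]
    rw [combsA]
    by_cases h0 : r = 0 <;> simp [h0]
  | cons c rest ih =>
    by_cases h0 : r = 0
    · conv_lhs => rw [combsBLoop.eq_def]
      rw [combsA]
      simp [h0]
    · conv_lhs => rw [combsBLoop.eq_def]
      simp only [h0, if_false]
      rw [ih (r - 1), ih r]
      conv_rhs => rw [combsA]
      simp [h0, Function.comp_def]

-- ===== VERDICT (by name: the statement is the Claim_ definition above) =====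
theorem combs_spec : Claim_equal_combs := by
  intro s r _
  unfold Spec_combs combs combs_alt
  rw [combsBLoop_cons, combsBLoop.eq_def]
  simp
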